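-- pv_equiv track=rewrite | github.com/LBPhysics/2025_master_thesis_python_leopold_bodamer | plotstyle/plotstyle/style.py | _escape_latex_text_outside_math
-- ===== SOURCE A (Python) =====
-- from typing import Optional, Iterable, Sequence, Union, List, Tuple
--
-- def _escape_latex_text_outside_math(s: str) -> str:
--     """Escape LaTeX special chars in plain text segments (outside math $...$).
--
--     Escapes: & % # _
--     Leaves math segments (between $) unchanged to avoid breaking equations.
--     """
--     if not s or "$" not in s:
--         # No math segments; escape globally
--         return (
--             s.replace("\\", "\\\\")
--             .replace("&", r"\&")
--             .replace("%", r"\%")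
--             .replace("#", r"\#")
--             .replace("_", r"\_")
--         )
--
--     parts = s.split("$")
--     out_parts: List[str] = []
--     for i, part in enumerate(parts):
--         if i % 2 == 0:
--             # Text segment (outside math): escape
--             escaped = (
--                 part.replace("\\", "\\\\")
--                 .replace("&", r"\&")
--                 .replace("%", r"\%")
--                 .replace("#", r"\#")
--                 .replace("_", r"\_")
--             )
--             out_parts.append(escaped)
--         else:
--             # Math segment: keep as-is
--             out_parts.append(part)
--     return "$".join(out_parts)
-- ===== SOURCE B (Python) =====
-- def _escape_latex_text_outside_math(s: str) -> str:
--     """Single streaming pass: a '$'-toggled state machine escaping chars outside math."""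
--     esc = {"\\": "\\\\", "&": r"\&", "%": r"\%", "#": r"\#", "_": r"\_"}
--     out = []
--     in_math = False
--     for c in s:
--         if c == "$":
--             out.append("$")
--             in_math = not in_math
--         elif in_math:
--             out.append(c)
--         else:
--             out.append(esc.get(c, c))
--     return "".join(out)
-- ===== Notes on version B (the rewrite author's own statement) =====
-- stated objective: alternative
-- what changed: Replaced A's split-on-'$' plus five chained str.replace passes over each even segment by a single streaming pass over the characters with an in_math toggle and a per-character escape table.
import Mathlib
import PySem

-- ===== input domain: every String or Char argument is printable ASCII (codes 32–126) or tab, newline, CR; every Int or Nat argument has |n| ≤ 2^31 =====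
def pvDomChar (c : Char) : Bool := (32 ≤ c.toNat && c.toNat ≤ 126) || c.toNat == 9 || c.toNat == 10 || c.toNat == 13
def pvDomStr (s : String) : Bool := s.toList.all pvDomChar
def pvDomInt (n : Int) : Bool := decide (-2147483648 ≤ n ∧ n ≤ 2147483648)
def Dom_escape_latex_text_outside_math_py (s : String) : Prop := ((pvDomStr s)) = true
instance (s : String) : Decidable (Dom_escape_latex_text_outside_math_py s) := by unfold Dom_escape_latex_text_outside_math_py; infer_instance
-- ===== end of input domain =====

-- B replaces A's split-then-chained-replaces decomposition by a single streaming
-- character pass with an in_math toggle; same return value on every input (alternative, not claimed faster).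

-- ===== PORT A =====
-- the five chained .replace calls A applies to a text segment
def pvEscAll (s : String) : String :=
  PySem.Str.replace
    (PySem.Str.replace
      (PySem.Str.replace
        (PySem.Str.replace
          (PySem.Str.replace s "\\" "\\\\")
          "&" "\\&")
        "%" "\\%")
      "#" "\\#")
    "_" "\\_"

def escape_latex_text_outside_math_py (s : String) : String :=
  if s = "" || !(PySem.Str.isIn "$" s) then
    pvEscAll s
  else
    -- s.split("$"): sep ≠ "" so Str.split? is `some`; getD [] is exact here
    let parts := (PySem.Str.split? s "$").getD []
    let out_parts := (PySem.List.enumerate parts).foldl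
      (fun acc ip => if PySem.Int.mod ip.1 2 == 0 then acc ++ [pvEscAll ip.2] else acc ++ [ip.2]) []
    PySem.Str.join "$" out_parts

-- ===== PORT B =====
-- the literal dict `esc` from Source B
def pvEscDict : PySem.Dict Char String :=
  PySem.Dict.ofList [('\\', "\\\\"), ('&', "\\&"), ('%', "\\%"), ('#', "\\#"), ('_', "\\_")]

-- one iteration of Source B's loop body over state (in_math, out)
def pvEscStep (st : Bool × List String) (c : Char) : Bool × List String :=
  if c = '$' then (!st.1, st.2 ++ ["$"])
  else if st.1 then (st.1, st.2 ++ [String.singleton c])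
  else (st.1, st.2 ++ [PySem.Dict.getD pvEscDict c (String.singleton c)])

def escape_latex_text_outside_math_py_alt (s : String) : String :=
  PySem.Str.join "" (s.toList.foldl pvEscStep (false, [])).2

-- ===== PRECONDITION & SPEC =====
def Spec_escape_latex_text_outside_math_py (s : String) (out : String) : Prop := out = escape_latex_text_outside_math_py_alt s
instance (s : String) (out : String) : Decidable (Spec_escape_latex_text_outside_math_py s out) := by unfold Spec_escape_latex_text_outside_math_py; infer_instance

-- ===== CLAIM (what is proved, stated in full; the proofs are below) =====
def Claim_equal_escape_latex_text_outside_math_py : Prop := ∀ (s : String), Dom_escape_latex_text_outside_math_py s → Spec_escape_latex_text_outside_math_py s (escape_latex_text_outside_math_py s)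

-- ===== LEMMAS AND PROOFS =====

-- per-character escape, the common specification both sides are reduced to
def pvEscChar (c : Char) : List Char :=
  if c = '\\' then ['\\', '\\']
  else if c = '&' ∨ c = '%' ∨ c = '#' ∨ c = '_' then ['\\', c]
  else [c]

-- the common recursive specification: stream the characters with an in_math flag
def pvSpecFn : Bool → List Char → List Char
  | _, [] => []
  | im, c :: t =>
      if c = '$' then '$' :: pvSpecFn (!im) t
      else (if im then [c] else pvEscChar c) ++ pvSpecFn im t

theorem pv_flatMap_flatMap (l : List Char) (f g : Char → List Char) :
    (l.flatMap f).flatMap g = l.flatMap (fun c => (f c).flatMap g) := by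
  induction l with
  | nil => rfl
  | cons c t ih => simp [List.flatMap_cons, List.flatMap_append, ih]

theorem pv_replace_go (o : Char) (new : List Char) :
    ∀ (fuel : Nat) (l acc : List Char), l.length ≤ fuel →
      PySem.Chars.replace.go [o] new fuel l acc
        = acc.reverse ++ l.flatMap (fun c => if c = o then new else [c]) := by
  intro fuel
  induction fuel with
  | zero =>
      intro l acc h
      have : l = [] := List.eq_nil_of_length_eq_zero (Nat.le_zero.mp h)
      subst this; simp [PySem.Chars.replace.go]
  | succ n ih =>
      intro l acc h
      cases l with
      | nil => simp [PySem.Chars.replace.go]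
      | cons c t =>
          by_cases hc : c = o
          · subst hc
            have hpre : [c].isPrefixOf (c :: t) = true := by simp [List.isPrefixOf]
            simp only [PySem.Chars.replace.go, hpre, List.length_cons] at *
            simp only [List.length_nil, Nat.zero_add, if_true, List.drop_succ_cons, List.drop_zero]
            rw [ih t (new.reverse ++ acc) (by omega)]
            simp [List.flatMap_cons]
          · have hpre : [o].isPrefixOf (c :: t) = false := by
              simp [List.isPrefixOf]
              exact fun h' => absurd h'.symm hc
            simp only [PySem.Chars.replace.go, hpre, Bool.false_eq_true, if_false,
              List.length_cons] at *
            rw [ih t (c :: acc) (by omega)]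
            simp [List.flatMap_cons, hc]

theorem pv_replace_single (s : List Char) (o : Char) (new : List Char) :
    PySem.Chars.replace s [o] new = s.flatMap (fun c => if c = o then new else [c]) := by
  have : ([o] : List Char).isEmpty = false := rfl
  simp only [PySem.Chars.replace, this, Bool.false_eq_true, if_false]
  exact pv_replace_go o new s.length s [] (le_refl _)

theorem pv_escAll_toList (s : String) : (pvEscAll s).toList = s.toList.flatMap pvEscChar := by
  simp only [pvEscAll, PySem.Str.toList_replace]
  have h1 : ("\\" : String).toList = ['\\'] := rfl
  have h2 : ("\\\\" : String).toList = ['\\', '\\'] := rfl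
  have h3 : ("&" : String).toList = ['&'] := rfl
  have h4 : ("\\&" : String).toList = ['\\', '&'] := rfl
  have h5 : ("%" : String).toList = ['%'] := rfl
  have h6 : ("\\%" : String).toList = ['\\', '%'] := rfl
  have h7 : ("#" : String).toList = ['#'] := rfl
  have h8 : ("\\#" : String).toList = ['\\', '#'] := rfl
  have h9 : ("_" : String).toList = ['_'] := rfl
  have h10 : ("\\_" : String).toList = ['\\', '_'] := rfl
  rw [h1, h2, h3, h4, h5, h6, h7, h8, h9, h10]
  rw [pv_replace_single, pv_replace_single, pv_replace_single, pv_replace_single,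
    pv_replace_single]
  rw [pv_flatMap_flatMap, pv_flatMap_flatMap, pv_flatMap_flatMap, pv_flatMap_flatMap]
  apply List.flatMap_congr
  intro c _
  by_cases e1 : c = '\\'
  · subst e1; simp [pvEscChar]
  · by_cases e2 : c = '&'
    · subst e2; simp [pvEscChar]
    · by_cases e3 : c = '%'
      · subst e3; simp [pvEscChar]
      · by_cases e4 : c = '#'
        · subst e4; simp [pvEscChar]
        · by_cases e5 : c = '_'
          · subst e5; simp [pvEscChar]
          · simp [pvEscChar, e1, e2, e3, e4, e5]

-- the result of s.split("$") as a structural recursion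
def pvMysplit : List Char → List Char → List (List Char)
  | cur, [] => [cur]
  | cur, c :: t => if c = '$' then cur :: pvMysplit [] t else pvMysplit (cur ++ [c]) t

theorem pv_mysplit_ne_nil (l : List Char) : ∀ cur, pvMysplit cur l ≠ [] := by
  induction l with
  | nil => intro cur; simp [pvMysplit]
  | cons c t ih =>
      intro cur
      by_cases hc : c = '$'
      · simp [pvMysplit, hc]
      · simpa [pvMysplit, hc] using ih (cur ++ [c])

theorem pv_split_go :
    ∀ (fuel : Nat) (l cur : List Char) (acc : List (List Char)), l.length ≤ fuel →
      PySem.Chars.splitOn.go ['$'] fuel l cur acc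
        = acc.reverse ++ pvMysplit cur.reverse l := by
  intro fuel
  induction fuel with
  | zero =>
      intro l cur acc h
      have : l = [] := List.eq_nil_of_length_eq_zero (Nat.le_zero.mp h)
      subst this; simp [PySem.Chars.splitOn.go, pvMysplit]
  | succ n ih =>
      intro l cur acc h
      cases l with
      | nil => simp [PySem.Chars.splitOn.go, pvMysplit]
      | cons c t =>
          by_cases hc : c = '$'
          · subst hc
            have hpre : ['$'].isPrefixOf ('$' :: t) = true := by simp [List.isPrefixOf]
            simp only [PySem.Chars.splitOn.go, hpre, List.length_cons] at *
            simp only [List.length_nil, Nat.zero_add, if_true, List.drop_succ_cons, List.drop_zero]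
            rw [ih t [] ((cur.reverse) :: acc) (by omega)]
            simp [pvMysplit]
          · have hpre : ['$'].isPrefixOf (c :: t) = false := by
              simp [List.isPrefixOf]
              exact fun h' => absurd h'.symm hc
            simp only [PySem.Chars.splitOn.go, hpre, Bool.false_eq_true, if_false,
              List.length_cons] at *
            rw [ih t (c :: cur) acc (by omega)]
            simp [pvMysplit, hc]

theorem pv_splitOn_eq (l : List Char) :
    PySem.Chars.splitOn l ['$'] = pvMysplit [] l := by
  simpa using pv_split_go (l.length + 1) l [] [] (by omega)

-- alternately escape the parts (flag true = currently outside math, escape)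
def pvAltMapS : Bool → List String → List String
  | _, [] => []
  | b, p :: ps => (if b then pvEscAll p else p) :: pvAltMapS (!b) ps

def pvAltMap : Bool → List (List Char) → List (List Char)
  | _, [] => []
  | b, p :: ps => (if b then p.flatMap pvEscChar else p) :: pvAltMap (!b) ps

theorem pv_mod_two_eq (k : Int) : PySem.Int.mod k 2 = k % 2 := by
  simp [PySem.Int.mod, Int.fmod_eq_emod]

theorem pv_fmod_two_succ (k : Int) :
    (PySem.Int.mod (k + 1) 2 == 0) = !(PySem.Int.mod k 2 == 0) := by
  rw [pv_mod_two_eq, pv_mod_two_eq]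
  rcases Int.emod_two_eq k with h | h
  · have h1 : (k + 1) % 2 = 1 := by omega
    simp [h, h1]
  · have h1 : (k + 1) % 2 = 0 := by omega
    simp [h, h1]

theorem pv_enumerate_fold (parts : List String) :
    ∀ (k : Int) (acc : List String),
      (PySem.List.enumerate parts k).foldl
          (fun acc ip => if PySem.Int.mod ip.1 2 == 0 then acc ++ [pvEscAll ip.2] else acc ++ [ip.2]) acc
        = acc ++ pvAltMapS (PySem.Int.mod k 2 == 0) parts := by
  induction parts with
  | nil => intro k acc; simp [PySem.List.enumerate, pvAltMapS]
  | cons p ps ih =>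
      intro k acc
      simp only [PySem.List.enumerate, List.foldl_cons]
      rw [ih (k + 1), pv_fmod_two_succ]
      simp only [pvAltMapS]
      split_ifs <;> simp

theorem pv_altMapS_toList (b : Bool) (parts : List String) :
    (pvAltMapS b parts).map String.toList = pvAltMap b (parts.map String.toList) := by
  induction parts generalizing b with
  | nil => simp [pvAltMapS, pvAltMap]
  | cons p ps ih =>
      cases b <;> simp [pvAltMapS, pvAltMap, ih, pv_escAll_toList]

theorem pv_join_alt (l : List Char) :
    ∀ (cur : List Char) (b : Bool),
      PySem.Chars.join ['$'] (pvAltMap b (pvMysplit cur l))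
        = (if b then cur.flatMap pvEscChar else cur) ++ pvSpecFn (!b) l := by
  induction l with
  | nil =>
      intro cur b
      cases b <;> simp [pvMysplit, pvAltMap, pvSpecFn, PySem.Chars.join_singleton]
  | cons c t ih =>
      intro cur b
      by_cases hc : c = '$'
      · subst hc
        obtain ⟨p, ps, hps⟩ : ∃ p ps, pvMysplit ([] : List Char) t = p :: ps := by
          cases h : pvMysplit ([] : List Char) t with
          | nil => exact absurd h (pv_mysplit_ne_nil t [])
          | cons p ps => exact ⟨p, ps, rfl⟩
        have ihx := ih [] (!b)
        rw [hps] at ihx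
        simp only [pvMysplit, hps, if_true, pvAltMap, Bool.not_not] at ihx ⊢
        rw [PySem.Chars.join_cons_cons, ihx]
        cases b <;> simp [pvSpecFn]
      · simp only [pvMysplit, if_neg hc]
        rw [ih (cur ++ [c]) b]
        cases b <;> simp [pvSpecFn, hc, List.flatMap_append, pvEscChar]

theorem pv_specFn_no_dollar (l : List Char) (h : '$' ∉ l) :
    pvSpecFn false l = l.flatMap pvEscChar := by
  induction l with
  | nil => rfl
  | cons c t ih =>
      have hc : c ≠ '$' := fun e => h (e ▸ List.mem_cons_self ..)
      have ht : '$' ∉ t := fun m => h (List.mem_cons_of_mem _ m)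
      simp [pvSpecFn, hc, ih ht]

-- the list of strings Source B's loop appends
def pvStrsOf : Bool → List Char → List String
  | _, [] => []
  | im, c :: t =>
      if c = '$' then "$" :: pvStrsOf (!im) t
      else if im then String.singleton c :: pvStrsOf im t
      else PySem.Dict.getD pvEscDict c (String.singleton c) :: pvStrsOf im t

theorem pv_foldB (l : List Char) :
    ∀ (im : Bool) (out : List String),
      (l.foldl pvEscStep (im, out)).2 = out ++ pvStrsOf im l := by
  induction l with
  | nil => intro im out; simp [pvStrsOf]
  | cons c t ih =>
      intro im out
      by_cases hc : c = '$'
      · subst hc; simp [pvEscStep, pvStrsOf, ih]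
      · cases im <;> simp [pvEscStep, pvStrsOf, hc, ih]

theorem pv_getD_escDict (c : Char) :
    (PySem.Dict.getD pvEscDict c (String.singleton c)).toList = pvEscChar c := by
  by_cases e1 : c = '\\'
  · subst e1; decide
  · by_cases e2 : c = '&'
    · subst e2; decide
    · by_cases e3 : c = '%'
      · subst e3; decide
      · by_cases e4 : c = '#'
        · subst e4; decide
        · by_cases e5 : c = '_'
          · subst e5; decide
          · have hfind : List.find? (fun p => p.1 == c) pvEscDict.items = none := by
              rw [List.find?_eq_none]
              intro p hp
              have : p.1 = '\\' ∨ p.1 = '&' ∨ p.1 = '%' ∨ p.1 = '#' ∨ p.1 = '_' := by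
                revert hp
                have : pvEscDict.items
                    = [('\\', "\\\\"), ('&', "\\&"), ('%', "\\%"), ('#', "\\#"), ('_', "\\_")] := by
                  decide
                rw [this]
                intro hp
                simp only [List.mem_cons, List.not_mem_nil, or_false] at hp
                rcases hp with h | h | h | h | h <;> subst h <;> simp
              simp only [beq_iff_eq]
              rcases this with h | h | h | h | h <;> rw [h] <;>
                first
                | exact fun e => e1 e.symm
                | exact fun e => e2 e.symm
                | exact fun e => e3 e.symm
                | exact fun e => e4 e.symm
                | exact fun e => e5 e.symm
            have hnone : PySem.Dict.get? pvEscDict c = none := by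
              simp [PySem.Dict.get?, hfind]
            simp [PySem.Dict.getD, hnone, pvEscChar, e1, e2, e3, e4, e5]

theorem pv_strsOf_toList (l : List Char) :
    ∀ im, (pvStrsOf im l).flatMap String.toList = pvSpecFn im l := by
  induction l with
  | nil => intro im; rfl
  | cons c t ih =>
      intro im
      by_cases hc : c = '$'
      · subst hc; simp [pvStrsOf, pvSpecFn, ih]
      · cases im <;>
          simp [pvStrsOf, pvSpecFn, hc, ih, pv_getD_escDict]

theorem pv_join_empty_sep (parts : List String) :
    (PySem.Str.join "" parts).toList = parts.flatMap String.toList := by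
  rw [PySem.Str.toList_join]
  have : ("" : String).toList = [] := rfl
  rw [this]
  induction parts with
  | nil => simp [PySem.Chars.join_nil]
  | cons p ps ih =>
      cases ps with
      | nil => simp [PySem.Chars.join_singleton]
      | cons q qs =>
          simp only [List.map_cons] at ih ⊢
          rw [PySem.Chars.join_cons_cons, ih]
          simp

theorem pv_alt_toList (s : String) :
    (escape_latex_text_outside_math_py_alt s).toList = pvSpecFn false s.toList := by
  unfold escape_latex_text_outside_math_py_alt
  rw [pv_join_empty_sep, pv_foldB, List.nil_append, pv_strsOf_toList]

theorem pv_a_toList (s : String) :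
    (escape_latex_text_outside_math_py s).toList = pvSpecFn false s.toList := by
  unfold escape_latex_text_outside_math_py
  by_cases hg : (s = "" || !(PySem.Str.isIn "$" s)) = true
  · rw [if_pos hg]
    rcases Bool.or_eq_true_iff.mp hg with he | hni
    · have : s = "" := by simpa using he
      subst this
      rfl
    · have hni' : PySem.Chars.isIn ("$" : String).toList s.toList = false := by
        simpa using hni
      rw [PySem.Chars.isIn_eq_false_iff] at hni'
      have hmem : '$' ∉ s.toList := by
        intro hm
        obtain ⟨pre, suf, hps⟩ := List.append_of_mem hm
        exact hni' ⟨pre, suf, by rw [hps]; simp⟩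
      rw [pv_escAll_toList, pv_specFn_no_dollar _ hmem]
  · rw [if_neg hg]
    -- split? with sep "$" is some (Chars.splitOn …); work at toList level
    obtain ⟨parts, hparts⟩ : ∃ parts, PySem.Str.split? s "$" = some parts := by
      cases h : PySem.Str.split? s "$" with
      | some parts => exact ⟨parts, rfl⟩
      | none =>
          have := PySem.Str.split?_map s "$"
          rw [h] at this
          simp only [Option.map_none] at this
          have hne : (("$" : String).toList).isEmpty = false := rfl
          simp [PySem.Chars.split?] at this
    have hmap : parts.map String.toList = PySem.Chars.splitOn s.toList ("$" : String).toList := by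
      have := PySem.Str.split?_map s "$"
      rw [hparts] at this
      have hne : (("$" : String).toList).isEmpty = false := rfl
      simp only [PySem.Chars.split?, hne, Bool.false_eq_true, if_false, Option.map_some,
        Option.some.injEq] at this
      exact this
    simp only [hparts, Option.getD_some]
    rw [pv_enumerate_fold parts 0 []]
    rw [List.nil_append, PySem.Str.toList_join]
    have hsep : ("$" : String).toList = ['$'] := rfl
    rw [hsep]
    rw [pv_altMapS_toList]
    rw [hmap, hsep, pv_splitOn_eq]
    have hm0 : (PySem.Int.mod 0 2 == 0) = true := rfl
    rw [hm0]
    have := pv_join_alt s.toList [] true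
    simpa using this

-- ===== VERDICT (by name: the statement is the Claim_ definition above) =====
theorem escape_latex_text_outside_math_py_spec : Claim_equal_escape_latex_text_outside_math_py := by
  intro s _
  unfold Spec_escape_latex_text_outside_math_py
  rw [← String.toList_inj, pv_a_toList, pv_alt_toList]
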